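-- pv_equiv track=rewrite | github.com/CazeroZ/hgpo | gigpo/core_gigpo.py | lcs_all
-- ===== SOURCE A (Python) =====
-- from functools import reduce
--
-- def lcs_all(sequences):
--     def lcs_two(seq1, seq2):
--         m, n = len(seq1), len(seq2)
--         dp = [[[] for _ in range(n + 1)] for _ in range(m + 1)]
--         for i in range(m):
--             for j in range(n):
--                 if seq1[i] == seq2[j]:
--                     dp[i + 1][j + 1] = dp[i][j] + [seq1[i]]
--                 else:
--                     dp[i + 1][j + 1] = max(dp[i][j + 1], dp[i + 1][j], key=len)
--         return dp[m][n]
--     return reduce(lcs_two, sequences)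
-- ===== SOURCE B (Python) =====
-- def lcs_all(sequences):
--     def lcs_two(s1, s2):
--         m, n = len(s1), len(s2)
--         L = [[0] * (n + 1) for _ in range(m + 1)]
--         for i in range(m):
--             for j in range(n):
--                 if s1[i] == s2[j]:
--                     L[i + 1][j + 1] = L[i][j] + 1
--                 else:
--                     up, left = L[i][j + 1], L[i + 1][j]
--                     L[i + 1][j + 1] = up if up >= left else left
--         # backtrack; prefer the up cell on ties (matches max(up, left, key=len))
--         out = []
--         i, j = m, n
--         while i > 0 and j > 0:
--             if s1[i - 1] == s2[j - 1]:
--                 out.append(s1[i - 1])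
--                 i -= 1
--                 j -= 1
--             elif L[i - 1][j] >= L[i][j - 1]:
--                 i -= 1
--             else:
--                 j -= 1
--         out.reverse()
--         return out
--     acc = sequences[0]
--     for seq in sequences[1:]:
--         acc = lcs_two(acc, seq)
--     return acc
-- ===== Notes on version B (the rewrite author's own statement) =====
-- stated objective: faster
-- what changed: A's DP stores a full candidate subsequence (a Python list) in every table cell and copies it on each step; B stores only lengths in the DP table and reconstructs the answer once by backtracking with the same up-cell tie-break, then folds the sequences with an explicit loop instead of reduce.
import Mathlib
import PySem

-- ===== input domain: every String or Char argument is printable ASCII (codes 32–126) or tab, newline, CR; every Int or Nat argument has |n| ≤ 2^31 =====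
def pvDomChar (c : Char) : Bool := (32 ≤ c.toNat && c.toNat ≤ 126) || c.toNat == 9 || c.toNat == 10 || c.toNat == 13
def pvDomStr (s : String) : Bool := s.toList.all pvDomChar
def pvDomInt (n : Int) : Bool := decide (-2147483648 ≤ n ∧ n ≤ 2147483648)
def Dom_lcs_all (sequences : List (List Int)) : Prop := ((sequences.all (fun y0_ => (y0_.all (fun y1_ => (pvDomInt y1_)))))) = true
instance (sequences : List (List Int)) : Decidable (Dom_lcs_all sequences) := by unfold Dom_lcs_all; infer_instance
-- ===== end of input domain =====

-- B replaces A's per-cell list-valued DP by a length-only DP table plus one backtracking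
-- reconstruction with the same up-cell tie-break: asymptotically faster (return value only).

-- Shared table-building helper: both Pythons fill an (m+1)×(n+1) table, borders `init`,
-- cell (i+1,j+1) computed by the loop body from cells (i,j), (i,j+1), (i+1,j).
-- Indices produced by the loops are in range, so `getD` reads are exact.
def stepJ {α : Type} (g : α → α → α → Nat → Nat → α) (init : α) (i : Nat)
    (t : List (List α)) (j : Nat) : List (List α) :=
  t.set (i+1) ((t.getD (i+1) []).set (j+1)
    (g ((t.getD i []).getD j init) ((t.getD i []).getD (j+1) init)
       ((t.getD (i+1) []).getD j init) i j))

def buildTable {α : Type} (g : α → α → α → Nat → Nat → α) (init : α) (m n : Nat) :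
    List (List α) :=
  (List.range m).foldl (fun t i => (List.range n).foldl (stepJ g init i) t)
    ((List.range (m+1)).map fun _ => (List.range (n+1)).map fun _ => init)

-- ===== PORT A =====
-- lcs_two: dp[i+1][j+1] = dp[i][j] + [x]  or  max(dp[i][j+1], dp[i+1][j], key=len)
-- (Python's max returns the SECOND argument only when its key is strictly larger).
def lcsTwoA (seq1 seq2 : List Int) : List Int :=
  let m := seq1.length
  let n := seq2.length
  let dp := buildTable (fun d u l i j =>
      if seq1.getD i 0 = seq2.getD j 0 then d ++ [seq1.getD i 0]
      else if l.length > u.length then l else u) [] m n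
  (dp.getD m []).getD n []

-- reduce(lcs_two, sequences); on [] Python's reduce raises TypeError (excluded by Pre_).
def lcs_all (sequences : List (List Int)) : List Int :=
  match sequences with
  | [] => []
  | s :: rest => rest.foldl lcsTwoA s

-- ===== PORT B =====
-- the while-loop backtracking of Source B: append then final reverse; up cell preferred on ties.
def btAlt (s1 s2 : List Int) (L : List (List Nat)) : Nat → Nat → List Int → List Int
  | 0, _, out => out
  | _+1, 0, out => out
  | i+1, j+1, out =>
    if s1.getD i 0 = s2.getD j 0 then btAlt s1 s2 L i j (out ++ [s1.getD i 0])
    else if (L.getD i []).getD (j+1) 0 ≥ (L.getD (i+1) []).getD j 0 then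
      btAlt s1 s2 L i (j+1) out
    else btAlt s1 s2 L (i+1) j out
termination_by i j _ => i + j

def lcsTwoAlt (s1 s2 : List Int) : List Int :=
  let m := s1.length
  let n := s2.length
  let L := buildTable (fun d u l i j =>
      if s1.getD i 0 = s2.getD j 0 then d + 1
      else if u ≥ l then u else l) (0 : Nat) m n
  (btAlt s1 s2 L m n []).reverse

-- acc = sequences[0]; for seq in sequences[1:]: acc = lcs_two(acc, seq)
-- (on [] Source B raises IndexError; excluded by Pre_).
def lcs_all_alt (sequences : List (List Int)) : List Int :=
  match sequences with
  | [] => []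
  | s :: rest => rest.foldl lcsTwoAlt s

-- ===== PRECONDITION & SPEC =====
-- Pre_ excludes only the empty list, on which A raises TypeError (reduce of an empty
-- iterable with no initializer) and B raises IndexError.
def Pre_lcs_all (sequences : List (List Int)) : Prop := sequences ≠ []
instance (sequences : List (List Int)) : Decidable (Pre_lcs_all sequences) := by
  unfold Pre_lcs_all; infer_instance

def pvWitness_lcs_all : List (List Int) := [[1, 2, 3], [2, 3], [0, 2, 3]]

def Spec_lcs_all (sequences : List (List Int)) (out : List Int) : Prop := out = lcs_all_alt sequences
instance (sequences : List (List Int)) (out : List Int) : Decidable (Spec_lcs_all sequences out) := by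
  unfold Spec_lcs_all; infer_instance

-- ===== CLAIM (what is proved, stated in full; the proofs are below) =====
def Claim_equal_lcs_all : Prop := ∀ (sequences : List (List Int)), Dom_lcs_all sequences → Pre_lcs_all sequences → Spec_lcs_all sequences (lcs_all sequences)

-- ===== LEMMAS AND PROOFS =====

-- the mathematical contents of a finished table cell
def Ftab {α : Type} (g : α → α → α → Nat → Nat → α) (init : α) : Nat → Nat → α
  | 0, _ => init
  | _+1, 0 => init
  | i+1, j+1 => g (Ftab g init i j) (Ftab g init i (j+1)) (Ftab g init (i+1) j) i j
termination_by i j => i + j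

lemma Ftab_zero_left {α : Type} (g : α → α → α → Nat → Nat → α) (init : α) (b : Nat) :
    Ftab g init 0 b = init := by cases b <;> simp [Ftab]

lemma Ftab_zero_right {α : Type} (g : α → α → α → Nat → Nat → α) (init : α) (a : Nat) :
    Ftab g init a 0 = init := by cases a <;> simp [Ftab]

-- foldl over List.range preserves an indexed invariant
lemma foldl_range_inv {β : Type} (f : β → Nat → β) (P : Nat → β → Prop) :
    ∀ (n : Nat) (t0 : β), P 0 t0 → (∀ j, j < n → ∀ t, P j t → P (j+1) (f t j)) →
      P n ((List.range n).foldl f t0) := by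
  intro n
  induction n with
  | zero => intro t0 h0 _; simpa using h0
  | succ k ih =>
    intro t0 h0 hs
    rw [List.range_succ, List.foldl_append]
    simp only [List.foldl_cons, List.foldl_nil]
    exact hs k (by omega) _ (ih t0 h0 (fun j hj => hs j (by omega)))

-- invariant: cells where W holds are finished (= Ftab), the rest still hold init
def TInv {α : Type} (g : α → α → α → Nat → Nat → α) (init : α) (m n : Nat)
    (W : Nat → Nat → Prop) (t : List (List α)) : Prop :=
  t.length = m+1 ∧ (∀ a, a ≤ m → (t.getD a []).length = n+1) ∧
  (∀ a b, a ≤ m → b ≤ n →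
    (W a b → (t.getD a []).getD b init = Ftab g init a b) ∧
    (¬ W a b → (t.getD a []).getD b init = init))

lemma TInv_congr {α : Type} {g : α → α → α → Nat → Nat → α} {init : α} {m n : Nat}
    {W W' : Nat → Nat → Prop} {t : List (List α)}
    (h : TInv g init m n W t) (hW : ∀ a b, a ≤ m → b ≤ n → (W a b ↔ W' a b)) :
    TInv g init m n W' t := by
  obtain ⟨h1, h2, h3⟩ := h
  refine ⟨h1, h2, fun a b ha hb => ?_⟩
  obtain ⟨c1, c2⟩ := h3 a b ha hb
  exact ⟨fun hw => c1 ((hW a b ha hb).mpr hw), fun hw => c2 (fun w => hw ((hW a b ha hb).mp w))⟩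

lemma getD_set_self {α : Type} (t : List α) (i : Nat) (v d : α) (h : i < t.length) :
    (t.set i v).getD i d = v := by
  simp [List.getD_eq_getElem?_getD, h]

lemma getD_set_ne {α : Type} (t : List α) (i a : Nat) (v d : α) (h : a ≠ i) :
    (t.set i v).getD a d = t.getD a d := by
  simp [List.getD_eq_getElem?_getD, List.getElem?_set_ne (fun he => h he.symm)]

lemma stepJ_inv {α : Type} (g : α → α → α → Nat → Nat → α) (init : α) (m n I : Nat)
    (hI : I < m) :
    ∀ J, J < n → ∀ t,
      TInv g init m n (fun a b => a ≤ I ∨ b = 0 ∨ (a = I+1 ∧ b ≤ J)) t →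
      TInv g init m n (fun a b => a ≤ I ∨ b = 0 ∨ (a = I+1 ∧ b ≤ J+1)) (stepJ g init I t J) := by
  intro J hJ t ht
  obtain ⟨h1, h2, h3⟩ := ht
  have hIlen : I + 1 < t.length := by omega
  have hrow : (t.getD (I+1) []).length = n+1 := h2 (I+1) (by omega)
  have hJlen : J + 1 < (t.getD (I+1) []).length := by omega
  -- value written into cell (I+1, J+1)
  have hd := (h3 I J (by omega) (by omega)).1 (Or.inl (le_refl I))
  have hu := (h3 I (J+1) (by omega) (by omega)).1 (Or.inl (le_refl I))
  have hl : (t.getD (I+1) []).getD J init = Ftab g init (I+1) J := by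
    rcases Nat.eq_zero_or_pos J with h0 | hpos
    · subst h0
      exact (h3 (I+1) 0 (by omega) (by omega)).1 (Or.inr (Or.inl rfl))
    · exact (h3 (I+1) J (by omega) (by omega)).1 (Or.inr (Or.inr ⟨rfl, le_refl J⟩))
  have hval : g ((t.getD I []).getD J init) ((t.getD I []).getD (J+1) init)
      ((t.getD (I+1) []).getD J init) I J = Ftab g init (I+1) (J+1) := by
    rw [hd, hu, hl]; simp [Ftab]
  -- describe the new table's cells
  have cellEq : ∀ a b, a ≤ m → b ≤ n →
      ((stepJ g init I t J).getD a []).getD b init =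
      (if a = I + 1 ∧ b = J + 1 then Ftab g init (I+1) (J+1)
       else (t.getD a []).getD b init) := by
    intro a b ha hb
    unfold stepJ
    by_cases hA : a = I + 1
    · subst hA
      rw [getD_set_self t (I+1) _ [] hIlen]
      by_cases hB : b = J + 1
      · subst hB; rw [getD_set_self _ (J+1) _ init hJlen, ← hval]; simp
      · rw [getD_set_ne _ (J+1) b _ init hB]; simp [hB]
    · rw [getD_set_ne t (I+1) a _ [] hA]; simp [hA]
  refine ⟨by simpa [stepJ] using h1, ?_, ?_⟩
  · intro a ha
    unfold stepJ
    by_cases hA : a = I + 1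
    · subst hA; rw [getD_set_self t (I+1) _ [] hIlen, List.length_set]; exact hrow
    · rw [getD_set_ne t (I+1) a _ [] hA]; exact h2 a ha
  · intro a b ha hb
    rw [cellEq a b ha hb]
    constructor
    · intro hw
      by_cases hc : a = I + 1 ∧ b = J + 1
      · simp [hc]
      · simp only [hc, if_false]
        have hw' : a ≤ I ∨ b = 0 ∨ (a = I+1 ∧ b ≤ J) := by
          rcases hw with h | h | ⟨h1', h2'⟩
          · exact Or.inl h
          · exact Or.inr (Or.inl h)
          · have : b ≤ J := by
              rcases Nat.lt_or_ge b (J+1) with hlt | hge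
              · omega
              · exact absurd ⟨h1', by omega⟩ hc
            exact Or.inr (Or.inr ⟨h1', this⟩)
        exact (h3 a b ha hb).1 hw'
    · intro hw
      have hc : ¬ (a = I + 1 ∧ b = J + 1) := by
        intro ⟨x, y⟩; exact hw (Or.inr (Or.inr ⟨x, by omega⟩))
      simp only [hc, if_false]
      exact (h3 a b ha hb).2 (fun w => hw (by
        rcases w with h | h | ⟨x, y⟩
        · exact Or.inl h
        · exact Or.inr (Or.inl h)
        · exact Or.inr (Or.inr ⟨x, by omega⟩)))

lemma buildTable_inv {α : Type} (g : α → α → α → Nat → Nat → α) (init : α) (m n : Nat) :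
    TInv g init m n (fun a b => a ≤ m ∨ b = 0) (buildTable g init m n) := by
  unfold buildTable
  have main := foldl_range_inv (fun t i => (List.range n).foldl (stepJ g init i) t)
    (fun I t => TInv g init m n (fun a b => a ≤ I ∨ b = 0) t) m
    ((List.range (m+1)).map fun _ => (List.range (n+1)).map fun _ => init)
    ?_ ?_
  · exact TInv_congr main (fun a b ha hb => by constructor <;> (intro h; tauto))
  · -- initial table
    refine ⟨by simp, fun a ha => ?_, fun a b ha hb => ?_⟩
    · rw [List.getD_eq_getElem?_getD, List.getElem?_map,
        List.getElem?_range (by omega : a < m+1)]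
      simp
    · have hcell : ((((List.range (m+1)).map fun _ => (List.range (n+1)).map fun _ => init)).getD a []).getD b init = init := by
        have h1 : (((List.range (m+1)).map fun _ => (List.range (n+1)).map fun _ => init)).getD a []
            = (List.range (n+1)).map fun _ => init := by
          rw [List.getD_eq_getElem?_getD, List.getElem?_map,
            List.getElem?_range (by omega : a < m+1)]
          rfl
        rw [h1, List.getD_eq_getElem?_getD, List.getElem?_map]
        by_cases hb' : b < n + 1
        · rw [List.getElem?_range hb']; rfl
        · rw [List.getElem?_eq_none (by simpa using (by omega : ¬ b < n+1))]; rfl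
      refine ⟨fun hw => ?_, fun _ => hcell⟩
      rcases hw with h | h
      · have : a = 0 := by omega
        subst this; rw [hcell, Ftab_zero_left]
      · subst h; rw [hcell, Ftab_zero_right]
  · -- outer step: run the inner loop over row I
    intro I hI t ht
    have start : TInv g init m n (fun a b => a ≤ I ∨ b = 0 ∨ (a = I+1 ∧ b ≤ 0)) t :=
      TInv_congr ht (fun a b ha hb => by constructor <;> (intro h; first | tauto | omega))
    have fin := foldl_range_inv (stepJ g init I)
      (fun J t => TInv g init m n (fun a b => a ≤ I ∨ b = 0 ∨ (a = I+1 ∧ b ≤ J)) t) n t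
      start (fun J hJ t' ht' => stepJ_inv g init m n I hI J hJ t' ht')
    exact TInv_congr fin (fun a b ha hb => by constructor <;> (intro h; first | tauto | omega))

lemma buildTable_cell {α : Type} (g : α → α → α → Nat → Nat → α) (init : α) (m n a b : Nat)
    (ha : a ≤ m) (hb : b ≤ n) :
    ((buildTable g init m n).getD a []).getD b init = Ftab g init a b :=
  ((buildTable_inv g init m n).2.2 a b ha hb).1 (Or.inl ha)

-- the two cell functions used by the ports, named for the proofs
def gA (s1 s2 : List Int) : List Int → List Int → List Int → Nat → Nat → List Int :=
  fun d u l i j =>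
    if s1.getD i 0 = s2.getD j 0 then d ++ [s1.getD i 0]
    else if l.length > u.length then l else u

def gB (s1 s2 : List Int) : Nat → Nat → Nat → Nat → Nat → Nat :=
  fun d u l i j => if s1.getD i 0 = s2.getD j 0 then d + 1 else if u ≥ l then u else l

-- the length table is the length of the list table
lemma len_Ftab (s1 s2 : List Int) :
    ∀ k i j, i + j ≤ k → (Ftab (gA s1 s2) [] i j).length = Ftab (gB s1 s2) 0 i j := by
  intro k
  induction k with
  | zero =>
    intro i j h
    have hi : i = 0 := by omega
    have hj : j = 0 := by omega
    subst hi; subst hj; simp [Ftab]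
  | succ K ih =>
    intro i j h
    match i, j with
    | 0, j => simp [Ftab_zero_left]
    | i+1, 0 => simp [Ftab_zero_right]
    | i+1, j+1 =>
      have hd := ih i j (by omega)
      have hu := ih i (j+1) (by omega)
      have hl := ih (i+1) j (by omega)
      simp only [Ftab, gA, gB]
      by_cases he : s1.getD i 0 = s2.getD j 0
      · rw [if_pos he, if_pos he]
        simp [hd]
      · rw [if_neg he, if_neg he]
        by_cases hc : (Ftab (gA s1 s2) [] (i+1) j).length > (Ftab (gA s1 s2) [] i (j+1)).length
        · have hb : ¬ (Ftab (gB s1 s2) 0 i (j+1) ≥ Ftab (gB s1 s2) 0 (i+1) j) := by omega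
          rw [if_pos hc, if_neg hb]
          exact hl
        · have hb : Ftab (gB s1 s2) 0 i (j+1) ≥ Ftab (gB s1 s2) 0 (i+1) j := by omega
          rw [if_neg hc, if_pos hb]
          exact hu

-- backtracking reconstructs the list-DP cell, reversed, onto the accumulator
lemma btAlt_eq (s1 s2 : List Int) (m n : Nat) (L : List (List Nat))
    (hL : ∀ a b, a ≤ m → b ≤ n → (L.getD a []).getD b 0 = Ftab (gB s1 s2) 0 a b) :
    ∀ k i j out, i + j ≤ k → i ≤ m → j ≤ n →
      btAlt s1 s2 L i j out = out ++ (Ftab (gA s1 s2) [] i j).reverse := by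
  intro k
  induction k with
  | zero =>
    intro i j out h hi hj
    have : i = 0 := by omega
    subst this
    simp [btAlt, Ftab_zero_left]
  | succ K ih =>
    intro i j out h hi hj
    match i, j with
    | 0, j => simp [btAlt, Ftab_zero_left]
    | i+1, 0 => simp [btAlt, Ftab_zero_right]
    | i+1, j+1 =>
      rw [btAlt]
      by_cases he : s1.getD i 0 = s2.getD j 0
      · rw [if_pos he]
        rw [ih i j _ (by omega) (by omega) (by omega)]
        have hstep : Ftab (gA s1 s2) [] (i+1) (j+1) = Ftab (gA s1 s2) [] i j ++ [s1.getD i 0] := by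
          simp only [Ftab, gA]
          rw [if_pos he]
        rw [hstep]
        simp
      · rw [if_neg he]
        have hcu := hL i (j+1) (by omega) hj
        have hcl := hL (i+1) j hi (by omega)
        have hlu := len_Ftab s1 s2 (i + (j+1)) i (j+1) (le_refl _)
        have hll := len_Ftab s1 s2 ((i+1) + j) (i+1) j (le_refl _)
        have hF : Ftab (gA s1 s2) [] (i+1) (j+1) =
            (if (Ftab (gA s1 s2) [] (i+1) j).length > (Ftab (gA s1 s2) [] i (j+1)).length
             then Ftab (gA s1 s2) [] (i+1) j else Ftab (gA s1 s2) [] i (j+1)) := by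
          simp only [Ftab, gA]
          rw [if_neg he]
        by_cases hc : (L.getD i []).getD (j+1) 0 ≥ (L.getD (i+1) []).getD j 0
        · rw [if_pos hc]
          rw [ih i (j+1) _ (by omega) (by omega) hj, hF]
          have hx : ¬ (Ftab (gA s1 s2) [] (i+1) j).length > (Ftab (gA s1 s2) [] i (j+1)).length := by
            rw [hcu, hcl] at hc; omega
          rw [if_neg hx]
        · rw [if_neg hc]
          rw [ih (i+1) j _ (by omega) hi (by omega), hF]
          have hx : (Ftab (gA s1 s2) [] (i+1) j).length > (Ftab (gA s1 s2) [] i (j+1)).length := by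
            rw [hcu, hcl] at hc; omega
          rw [if_pos hx]

lemma lcsTwo_eq (s1 s2 : List Int) : lcsTwoA s1 s2 = lcsTwoAlt s1 s2 := by
  unfold lcsTwoA lcsTwoAlt
  have hA : ((buildTable (gA s1 s2) [] s1.length s2.length).getD s1.length []).getD s2.length []
      = Ftab (gA s1 s2) [] s1.length s2.length :=
    buildTable_cell (gA s1 s2) [] s1.length s2.length s1.length s2.length (le_refl _) (le_refl _)
  have hB : btAlt s1 s2 (buildTable (gB s1 s2) 0 s1.length s2.length) s1.length s2.length []
      = [] ++ (Ftab (gA s1 s2) [] s1.length s2.length).reverse :=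
    btAlt_eq s1 s2 s1.length s2.length _
      (fun a b ha hb => buildTable_cell (gB s1 s2) 0 s1.length s2.length a b ha hb)
      (s1.length + s2.length) s1.length s2.length [] (le_refl _) (le_refl _) (le_refl _)
  show ((buildTable (gA s1 s2) [] s1.length s2.length).getD s1.length []).getD s2.length []
      = (btAlt s1 s2 (buildTable (gB s1 s2) 0 s1.length s2.length) s1.length s2.length []).reverse
  rw [hA, hB]
  simp

lemma foldl_lcsTwo_eq (rest : List (List Int)) :
    ∀ s, rest.foldl lcsTwoA s = rest.foldl lcsTwoAlt s := by
  induction rest with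
  | nil => intro s; rfl
  | cons x xs ih => intro s; simp only [List.foldl_cons, lcsTwo_eq, ih]

-- ===== VERDICT (by name: the statement is the Claim_ definition above) =====
theorem lcs_all_spec : Claim_equal_lcs_all := by
  intro sequences _ hpre
  unfold Spec_lcs_all lcs_all lcs_all_alt
  match sequences with
  | [] => exact absurd rfl hpre
  | s :: rest => exact foldl_lcsTwo_eq rest s
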